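-- pv_equiv track=rewrite | github.com/siqi-wang547/algo-py | fb/regular_expression_matching.py | isMatchBottomUp
-- ===== SOURCE A (Python) =====
-- def isMatchBottomUp(s, p):
--     dp = [[False]*(len(p)+1) for _ in range(len(s)+1)]
--     dp[-1][-1] = True
--     for i in range(len(s), -1, -1):
--         for j in range(len(p)-1, -1, -1):
--             match_first = i < len(s) and p[j] in [s[i], '.']
--             if j + 1 < len(p) and p[j+1] == '*':
--                 dp[i][j] = dp[i][j+2] or match_first and dp[i+1][j]
--             else:
--                 dp[i][j] = match_first and dp[i+1][j+1]
--     return dp[0][0]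
-- ===== SOURCE B (Python) =====
-- def isMatchBottomUp(s, p):
--     n, m = len(s), len(p)
--     memo = {}
--
--     def dp(i, j):
--         key = (i, j)
--         if key in memo:
--             return memo[key]
--         if j == m:
--             res = i == n
--         else:
--             match_first = i < n and p[j] in (s[i], '.')
--             if j + 1 < m and p[j + 1] == '*':
--                 res = dp(i, j + 2) or (match_first and dp(i + 1, j))
--             else:
--                 res = match_first and dp(i + 1, j + 1)
--         memo[key] = res
--         return res
--
--     return dp(0, 0)
-- ===== Notes on version B (the rewrite author's own statement) =====
-- stated objective: faster
-- what changed: Replaces the bottom-up DP table that is filled for every (i,j) with a memoized top-down recursion dp(i,j) that only evaluates states reachable from (0,0).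
import Mathlib
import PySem

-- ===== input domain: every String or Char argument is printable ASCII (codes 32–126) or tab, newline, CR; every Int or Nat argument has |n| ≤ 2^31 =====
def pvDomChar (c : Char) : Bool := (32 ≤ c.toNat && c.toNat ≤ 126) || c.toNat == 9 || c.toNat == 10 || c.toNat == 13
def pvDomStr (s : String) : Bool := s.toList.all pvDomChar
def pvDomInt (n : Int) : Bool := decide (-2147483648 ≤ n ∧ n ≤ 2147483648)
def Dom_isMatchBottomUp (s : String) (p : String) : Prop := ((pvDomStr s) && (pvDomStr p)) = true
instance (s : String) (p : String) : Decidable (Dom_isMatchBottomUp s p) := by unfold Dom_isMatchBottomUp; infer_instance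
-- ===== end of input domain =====

-- B replaces A's bottom-up DP table (filled for every (i,j)) by a memoized top-down recursion on the string/pattern suffixes; same return value, alternative decomposition.


-- ===== PORT A =====
-- dp[i][j] read; A only reads out of range behind Python's short-circuit `and`, where the default never surfaces
def pvGet2 (dp : List (List Bool)) (i j : Int) : Bool :=
  ((PySem.List.pyGet? dp i).bind (fun r => PySem.List.pyGet? r j)).getD false

-- dp[i][j] = v  (Python's two-level assignment)
def pvSet2 (dp : List (List Bool)) (i j : Int) (v : Bool) : List (List Bool) :=
  PySem.List.pySetD dp i (PySem.List.pySetD ((PySem.List.pyGet? dp i).getD []) j v)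

def isMatchBottomUp (s : String) (p : String) : Bool :=
  let S := s.toList
  let P := p.toList
  -- dp = [[False]*(len(p)+1) for _ in range(len(s)+1)]
  let dp0 : List (List Bool) :=
    (List.range (S.length + 1)).map (fun _ => List.replicate (P.length + 1) false)
  -- dp[-1][-1] = True
  let dp1 := pvSet2 dp0 (-1) (-1) true
  let dp :=
    (PySem.List.pyRange (S.length : Int) (-1) (-1)).foldl (fun dp i =>
      (PySem.List.pyRange ((P.length : Int) - 1) (-1) (-1)).foldl (fun dp j =>
        -- match_first = i < len(s) and p[j] in [s[i], '.']   (s[i] is only read under the guard in Python; the default never surfaces)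
        let mf := decide (i < (S.length : Int)) &&
          (PySem.List.pyGetD P j ' ' == PySem.List.pyGetD S i ' ' ||
           PySem.List.pyGetD P j ' ' == '.')
        let v :=
          if decide (j + 1 < (P.length : Int)) && (PySem.List.pyGetD P (j + 1) ' ' == '*') then
            pvGet2 dp i (j + 2) || (mf && pvGet2 dp (i + 1) j)
          else
            mf && pvGet2 dp (i + 1) (j + 1)
        pvSet2 dp i j v) dp) dp1
  pvGet2 dp 0 0

-- ===== PORT B =====
-- dp(i, j) of Source B, written as structural recursion on the suffixes s[i:], p[j:] (the memo table only caches; the values are identical)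
def pvMatch : List Char → List Char → Bool
  | s, [] => s.isEmpty                        -- if j == m: res = (i == n)
  | [], _ :: p' =>                            -- match_first is False for empty s
    match p' with
    | c2 :: p'' => if c2 == '*' then pvMatch [] p'' else false
    | [] => false
  | a :: s', c :: p' =>
    let mf := c == a || c == '.'
    match p' with
    | c2 :: p'' =>
      if c2 == '*' then pvMatch (a :: s') p'' || (mf && pvMatch s' (c :: c2 :: p''))
      else mf && pvMatch s' p'
    | [] => mf && pvMatch s' p'
  termination_by s p => (s.length, p.length)
  decreasing_by all_goals simp_all; omega

def isMatchBottomUp_alt (s : String) (p : String) : Bool :=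
  pvMatch s.toList p.toList

-- ===== PRECONDITION & SPEC =====
def Spec_isMatchBottomUp (s : String) (p : String) (out : Bool) : Prop := out = isMatchBottomUp_alt s p
instance (s : String) (p : String) (out : Bool) : Decidable (Spec_isMatchBottomUp s p out) := by unfold Spec_isMatchBottomUp; infer_instance

-- ===== CLAIM (what is proved, stated in full; the proofs are below) =====
def Claim_equal_isMatchBottomUp : Prop := ∀ (s : String) (p : String), Dom_isMatchBottomUp s p → Spec_isMatchBottomUp s p (isMatchBottomUp s p)

-- ===== LEMMAS AND PROOFS =====

-- the intended value of dp[i][j]: B's recursion applied to the suffixes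
def pvF (S P : List Char) (i j : Nat) : Bool := pvMatch (S.drop i) (P.drop j)

def pvMf (S P : List Char) (i j : Nat) : Bool :=
  decide (i < S.length) && (P.getD j ' ' == S.getD i ' ' || P.getD j ' ' == '.')

lemma pvF_last (S P : List Char) (i : Nat) (hi : i ≤ S.length) :
    pvF S P i P.length = decide (i = S.length) := by
  unfold pvF
  rw [List.drop_length]
  cases h : S.drop i with
  | nil =>
    simp [pvMatch]
    have := List.length_drop (l := S) (i := i)
    rw [h] at this; simp at this; omega
  | cons a s' =>
    simp [pvMatch]
    have := List.length_drop (l := S) (i := i)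
    rw [h] at this; simp at this; omega

-- one step of B's recursion, phrased exactly as A's loop body computes dp[i][j]
lemma pvF_step (S P : List Char) (i j : Nat) (hj : j < P.length) :
    pvF S P i j =
      if (decide (j + 1 < P.length) && (P.getD (j + 1) ' ' == '*')) = true then
        pvF S P i (j + 2) || (pvMf S P i j && pvF S P (i + 1) j)
      else
        pvMf S P i j && pvF S P (i + 1) (j + 1) := by
  unfold pvF pvMf
  have hPj : P.drop j = P[j] :: P.drop (j + 1) := List.drop_eq_getElem_cons hj
  by_cases hi : i < S.length
  · have hSi : S.drop i = S[i] :: S.drop (i + 1) := List.drop_eq_getElem_cons hi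
    rw [hPj, hSi]
    by_cases hj1 : j + 1 < P.length
    · have hPj1 : P.drop (j + 1) = P[j+1] :: P.drop (j + 2) := List.drop_eq_getElem_cons hj1
      rw [hPj1]
      simp only [pvMatch, hi, hj1, decide_true, Bool.true_and, List.getD_eq_getElem _ _ hj,
        List.getD_eq_getElem _ _ hj1, List.getD_eq_getElem _ _ hi]
    · have hPj1 : P.drop (j + 1) = [] := by
        apply List.drop_eq_nil_of_le; omega
      rw [hPj1]
      simp only [pvMatch, hi, hj1, decide_true, decide_false, Bool.false_and, Bool.true_and,
        List.getD_eq_getElem _ _ hj, List.getD_eq_getElem _ _ hi]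
      simp
  · have hSi : S.drop i = [] := by apply List.drop_eq_nil_of_le; omega
    have hSi1 : S.drop (i + 1) = [] := by apply List.drop_eq_nil_of_le; omega
    rw [hPj, hSi, hSi1]
    by_cases hj1 : j + 1 < P.length
    · have hPj1 : P.drop (j + 1) = P[j+1] :: P.drop (j + 2) := List.drop_eq_getElem_cons hj1
      rw [hPj1]
      simp only [pvMatch, hi, hj1, decide_true, decide_false, Bool.false_and,
        List.getD_eq_getElem _ _ hj1]
      by_cases hstar : P[j+1] == '*'
      · simp [hstar]
      · simp at hstar; simp [hstar]
    · have hPj1 : P.drop (j + 1) = [] := by apply List.drop_eq_nil_of_le; omega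
      rw [hPj1]
      simp [pvMatch, hi, hj1]

lemma pvGet2_natCast (dp : List (List Bool)) (i j : Nat) :
    pvGet2 dp (i : Int) (j : Int) = ((dp.getD i []).getD j false) := by
  simp [pvGet2, pysem]
  cases h : dp[i]? with
  | none => simp
  | some r => simp [Option.getD]

lemma pvSet2_natCast (dp : List (List Bool)) (i j : Nat) (v : Bool) :
    pvSet2 dp (i : Int) (j : Int) v = dp.set i ((dp.getD i []).set j v) := by
  simp [pvSet2, pysem]

lemma pvGet2_pvSet2 (dp : List (List Bool)) (i j i' j' : Nat) (v : Bool)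
    (hi : i < dp.length) (hj : j < (dp.getD i []).length) :
    pvGet2 (pvSet2 dp (i : Int) (j : Int) v) (i' : Int) (j' : Int) =
      if i' = i ∧ j' = j then v else pvGet2 dp (i' : Int) (j' : Int) := by
  rw [pvSet2_natCast, pvGet2_natCast, pvGet2_natCast]
  rw [List.getD_eq_getElem?_getD] at hj
  simp only [List.getD_eq_getElem?_getD, List.getElem?_set]
  by_cases h1 : i' = i
  · subst h1
    simp only [hi, if_pos]
    by_cases h2 : j' = j
    · subst h2
      simp [hj]
    · rw [Option.getD_some, List.getElem?_set_ne (show j ≠ j' from fun h => h2 h.symm)]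
      simp [h2]
  · rw [if_neg (show ¬ i = i' from fun h => h1 h.symm)]
    simp [h1]

lemma pvLen_pvSet2 (dp : List (List Bool)) (i j : Nat) (v : Bool) :
    (pvSet2 dp (i : Int) (j : Int) v).length = dp.length := by
  rw [pvSet2_natCast]; simp

lemma pvRows_pvSet2 (dp : List (List Bool)) (i j : Nat) (v : Bool) (L : Nat)
    (hi : i < dp.length) (h : ∀ r ∈ dp, r.length = L) :
    ∀ r ∈ pvSet2 dp (i : Int) (j : Int) v, r.length = L := by
  rw [pvSet2_natCast]
  intro r hr
  rcases List.mem_or_eq_of_mem_set hr with h' | h'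
  · exact h r h'
  · subst h'
    rw [List.length_set, List.getD_eq_getElem?_getD, List.getElem?_eq_getElem hi]
    exact h _ (List.getElem_mem hi)

-- invariant: table has the right shape; rows above i, row i from column t on, and column len(p) all hold B's value
def pvOk (S P : List Char) (dp : List (List Bool)) (i t : Nat) : Prop :=
  dp.length = S.length + 1 ∧ (∀ r ∈ dp, r.length = P.length + 1) ∧
  ∀ i' j', i' ≤ S.length → j' ≤ P.length →
    (i < i' ∨ (i' = i ∧ t ≤ j') ∨ j' = P.length) →
    pvGet2 dp (i' : Int) (j' : Int) = pvF S P i' j'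

-- A's inner loop body / outer loop body, named for the proofs (definitionally the lambdas of the port)
def pvInnerBody (S P : List Char) (i : Int) (dp : List (List Bool)) (j : Int) : List (List Bool) :=
  let mf := decide (i < (S.length : Int)) &&
    (PySem.List.pyGetD P j ' ' == PySem.List.pyGetD S i ' ' ||
     PySem.List.pyGetD P j ' ' == '.')
  let v :=
    if decide (j + 1 < (P.length : Int)) && (PySem.List.pyGetD P (j + 1) ' ' == '*') then
      pvGet2 dp i (j + 2) || (mf && pvGet2 dp (i + 1) j)
    else
      mf && pvGet2 dp (i + 1) (j + 1)
  pvSet2 dp i j v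

def pvOuterBody (S P : List Char) (dp : List (List Bool)) (i : Int) : List (List Bool) :=
  (PySem.List.pyRange ((P.length : Int) - 1) (-1) (-1)).foldl (pvInnerBody S P i) dp

lemma pvInnerBody_val (S P : List Char) (dp : List (List Bool)) (i j : Nat)
    (hi : i ≤ S.length) (hj : j < P.length) (hok : pvOk S P dp i (j + 1)) :
    pvInnerBody S P (i : Int) dp (j : Int) = pvSet2 dp (i : Int) (j : Int) (pvF S P i j) := by
  obtain ⟨hlen, hrows, hcorr⟩ := hok
  have e1 : ((j : Int) + 1) = ((j + 1 : Nat) : Int) := by push_cast; ring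
  have e2 : ((j : Int) + 2) = ((j + 2 : Nat) : Int) := by push_cast; ring
  have e3 : ((i : Int) + 1) = ((i + 1 : Nat) : Int) := by push_cast; ring
  unfold pvInnerBody
  rw [e1, e2, e3]
  simp only [PySem.List.pyGetD_natCast, Nat.cast_lt]
  congr 1
  rw [pvF_step S P i j hj]
  unfold pvMf
  by_cases hstar : (decide (j + 1 < P.length) && (P.getD (j + 1) ' ' == '*')) = true
  · rw [if_pos hstar, if_pos hstar]
    have hj2 : j + 2 ≤ P.length := by
      have := (Bool.and_eq_true _ _).mp hstar |>.1
      simp at this; omega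
    rw [hcorr i (j + 2) hi hj2 (Or.inr (Or.inl ⟨rfl, by omega⟩))]
    by_cases hin : i < S.length
    · rw [hcorr (i + 1) j (by omega) (by omega) (Or.inl (by omega))]
    · simp [hin]
  · rw [if_neg hstar, if_neg hstar]
    by_cases hin : i < S.length
    · rw [hcorr (i + 1) (j + 1) (by omega) (by omega) (Or.inl (by omega))]
    · simp [hin]

lemma pvStep (S P : List Char) (dp : List (List Bool)) (i j : Nat)
    (hi : i ≤ S.length) (hj : j < P.length) (hok : pvOk S P dp i (j + 1)) :
    pvOk S P (pvInnerBody S P (i : Int) dp (j : Int)) i j := by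
  rw [pvInnerBody_val S P dp i j hi hj hok]
  obtain ⟨hlen, hrows, hcorr⟩ := hok
  have hid : i < dp.length := by omega
  have hjd : j < (dp.getD i []).length := by
    rw [List.getD_eq_getElem?_getD, List.getElem?_eq_getElem hid, Option.getD_some]
    rw [hrows _ (List.getElem_mem hid)]; omega
  refine ⟨by rw [pvLen_pvSet2]; exact hlen, pvRows_pvSet2 dp i j _ _ hid hrows, ?_⟩
  intro i' j' hi' hj' hreg
  rw [pvGet2_pvSet2 dp i j i' j' _ hid hjd]
  split_ifs with he
  · rw [he.1, he.2]
  · apply hcorr i' j' hi' hj'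
    rcases hreg with h | ⟨h1, h2⟩ | h
    · exact Or.inl h
    · rcases Nat.eq_or_lt_of_le h2 with h3 | h3
      · exact absurd ⟨h1, h3.symm⟩ he
      · exact Or.inr (Or.inl ⟨h1, by omega⟩)
    · exact Or.inr (Or.inr h)

lemma pvInnerLoop (S P : List Char) (i : Nat) (hi : i ≤ S.length) :
    ∀ (t : Nat), t ≤ P.length → ∀ dp, pvOk S P dp i t →
      pvOk S P ((PySem.List.pyRange ((t : Int) - 1) (-1) (-1)).foldl (pvInnerBody S P (i : Int)) dp) i 0 := by
  intro t
  induction t with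
  | zero =>
    intro _ dp h
    rw [show ((0 : Nat) : Int) - 1 = (-1 : Int) by norm_num,
      PySem.List.pyRange_neg_one_eq_nil (by omega)]
    simpa using h
  | succ t ih =>
    intro ht dp h
    rw [show ((t + 1 : Nat) : Int) - 1 = (t : Int) by push_cast; ring,
      PySem.List.pyRange_neg_one_cons (by omega), List.foldl_cons]
    exact ih (by omega) _ (pvStep S P dp i t hi (by omega) h)

lemma pvOk_weaken (S P : List Char) (dp : List (List Bool)) (i : Nat)
    (h : pvOk S P dp (i + 1) 0) : pvOk S P dp i P.length := by
  obtain ⟨h1, h2, h3⟩ := h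
  refine ⟨h1, h2, ?_⟩
  intro i' j' hi' hj' hreg
  apply h3 i' j' hi' hj'
  omega

lemma pvOuterLoop (S P : List Char) :
    ∀ (k : Nat), k ≤ S.length → ∀ dp, pvOk S P dp k P.length →
      pvOk S P ((PySem.List.pyRange (k : Int) (-1) (-1)).foldl (pvOuterBody S P) dp) 0 0 := by
  intro k
  induction k with
  | zero =>
    intro _ dp h
    rw [PySem.List.pyRange_neg_one_cons (by omega), List.foldl_cons,
      show ((0 : Nat) : Int) - 1 = (-1 : Int) by norm_num,
      PySem.List.pyRange_neg_one_eq_nil (by omega), List.foldl_nil]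
    exact pvInnerLoop S P 0 (by omega) P.length (le_refl _) dp h
  | succ k ih =>
    intro hk dp h
    rw [PySem.List.pyRange_neg_one_cons (by omega), List.foldl_cons,
      show ((k + 1 : Nat) : Int) - 1 = (k : Int) by push_cast; ring]
    refine ih (by omega) _ (pvOk_weaken S P _ k ?_)
    exact pvInnerLoop S P (k + 1) (by omega) P.length (le_refl _) dp h

lemma pvSetD_neg_one {α : Type} (xs : List α) (hx : xs ≠ []) (v : α) :
    PySem.List.pySetD xs (-1) v = xs.set (xs.length - 1) v := by
  have hlen : 0 < xs.length := List.length_pos_iff.mpr hx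
  simp only [PySem.List.pySetD, PySem.List.pySet?, PySem.List.pyIdx?]
  rw [if_neg (by omega), if_pos (by omega)]
  simp

lemma pvGet?_neg_one {α : Type} (xs : List α) (hx : xs ≠ []) :
    PySem.List.pyGet? xs (-1) = some (xs.getLast hx) := by
  have hlen : 0 < xs.length := List.length_pos_iff.mpr hx
  simp only [PySem.List.pyGet?, PySem.List.pyIdx?]
  rw [if_neg (by omega), if_pos (by omega)]
  simp [List.getLast_eq_getElem]

lemma pvInit (S P : List Char) :
    pvOk S P (pvSet2 ((List.range (S.length + 1)).map (fun _ => List.replicate (P.length + 1) false)) (-1) (-1) true) S.length P.length := by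
  set r : List Bool := List.replicate (P.length + 1) false with hr
  have hrow : (List.range (S.length + 1)).map (fun _ => r) = List.replicate (S.length + 1) r := by
    rw [List.map_const']; simp
  have hne : List.replicate (S.length + 1) r ≠ [] := by simp
  have hdp : pvSet2 ((List.range (S.length + 1)).map (fun _ => r)) (-1) (-1) true
      = (List.replicate (S.length + 1) r).set S.length (r.set P.length true) := by
    rw [hrow]
    unfold pvSet2
    rw [pvGet?_neg_one _ hne, Option.getD_some, List.getLast_replicate,
      pvSetD_neg_one _ (by simp [hr]) true, pvSetD_neg_one _ hne,
      List.length_replicate]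
    simp [hr]
  rw [hdp]
  refine ⟨by simp, ?_, ?_⟩
  · intro row hrow'
    rcases List.mem_or_eq_of_mem_set hrow' with h' | h'
    · rw [List.eq_of_mem_replicate h', hr, List.length_replicate]
    · rw [h', List.length_set, hr, List.length_replicate]
  · intro i' j' hi' hj' hreg
    have hj'm : j' = P.length := by omega
    subst hj'm
    rw [pvF_last S P i' hi', pvGet2_natCast]
    by_cases hii : i' = S.length
    · subst hii
      simp only [List.getD_eq_getElem?_getD]
      rw [List.getElem?_set_self (by simp), Option.getD_some,
        List.getElem?_set_self (by simp [hr]), Option.getD_some]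
      simp
    · simp only [List.getD_eq_getElem?_getD]
      rw [List.getElem?_set_ne (show S.length ≠ i' from fun h => hii h.symm),
        List.getElem?_replicate_of_lt (by omega), Option.getD_some]
      simp [hr, hii]

-- ===== VERDICT (by name: the statement is the Claim_ definition above) =====
theorem isMatchBottomUp_spec : Claim_equal_isMatchBottomUp := by
  intro s p _
  show isMatchBottomUp s p = isMatchBottomUp_alt s p
  have h := pvOuterLoop s.toList p.toList s.toList.length (le_refl _) _ (pvInit s.toList p.toList)
  have h00 := h.2.2 0 0 (by omega) (by omega) (Or.inr (Or.inl ⟨rfl, le_refl 0⟩))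
  show pvGet2 ((PySem.List.pyRange (s.toList.length : Int) (-1) (-1)).foldl (pvOuterBody s.toList p.toList)
      (pvSet2 ((List.range (s.toList.length + 1)).map (fun _ => List.replicate (p.toList.length + 1) false)) (-1) (-1) true)) 0 0 = pvMatch s.toList p.toList
  have e0 : ((0 : Nat) : Int) = (0 : Int) := rfl
  rw [← e0, h00]
  simp [pvF]
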